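-- pv_equiv track=rewrite | github.com/Grizzlo/basic_programing | lab5_3.py | super_fibonacci
-- ===== SOURCE A (Python) =====
-- def super_fibonacci(n,m):
--     if m>=n:
--         return 1
--     else:
--         sup_list = [1 for i in range(m)]
--         for i in range(n-m):
--             new_value = 0
--             for j in range(m):
--                 new_value = new_value + sup_list[j]
--             sup_list.insert(0,  new_value)
--         return sup_list[0]
-- ===== SOURCE B (Python) =====
-- def super_fibonacci(n, m):
--     if m >= n:
--         return 1
--     if m <= 0:
--         return 0
--     vals = [1] * m
--     total = m
--     for i in range(n - m):
--         new = total
--         total += new - vals[i]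
--         vals.append(new)
--     return vals[-1]
-- ===== Notes on version B (the rewrite author's own statement) =====
-- stated objective: alternative
-- what changed: Replaces the per-step re-summation of the first m elements plus O(len) front-insertion with a single pass that appends to a growing list and maintains the window sum incrementally (add the new term, subtract the term sliding out of the window).
import Mathlib
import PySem

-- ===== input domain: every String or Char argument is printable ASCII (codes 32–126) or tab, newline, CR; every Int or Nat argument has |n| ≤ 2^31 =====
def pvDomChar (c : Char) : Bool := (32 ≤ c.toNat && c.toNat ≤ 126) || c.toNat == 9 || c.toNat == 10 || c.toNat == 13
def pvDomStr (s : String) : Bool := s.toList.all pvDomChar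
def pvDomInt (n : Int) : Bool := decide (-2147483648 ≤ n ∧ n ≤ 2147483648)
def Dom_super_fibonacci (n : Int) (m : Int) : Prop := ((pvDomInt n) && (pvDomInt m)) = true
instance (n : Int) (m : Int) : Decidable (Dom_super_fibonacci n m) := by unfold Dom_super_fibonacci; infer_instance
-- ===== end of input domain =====

-- B replaces A's per-step re-summation of the first m elements and front-insertion by a
-- one-pass incremental sliding-window sum (objective: alternative; big-integer growth
-- dominates the run time at large n, so no overall speed is claimed).

-- ===== PORT A =====
def super_fibonacci (n : Int) (m : Int) : Int :=
  if m ≥ n then 1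
  else
    let sup0 : List Int := (PySem.List.pyRange 0 m 1).map (fun _ => 1)
    let sup := (PySem.List.pyRange 0 (n - m) 1).foldl (fun sup _ =>
      let nv := (PySem.List.pyRange 0 m 1).foldl
        (fun acc j => acc + PySem.List.pyGetD sup j 0) 0
      nv :: sup) sup0
    PySem.List.pyGetD sup 0 0

-- ===== PORT B =====
def super_fibonacci_alt (n : Int) (m : Int) : Int :=
  if m ≥ n then 1
  else if m ≤ 0 then 0
  else
    let st := (PySem.List.pyRange 0 (n - m) 1).foldl (fun (st : List Int × Int) i =>
      let new := st.2
      let total := st.2 + (new - PySem.List.pyGetD st.1 i 0)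
      (st.1 ++ [new], total)) (List.replicate m.toNat 1, m)
    PySem.List.pyGetD st.1 (-1) 0

-- ===== PRECONDITION & SPEC =====
def Spec_super_fibonacci (n : Int) (m : Int) (out : Int) : Prop := out = super_fibonacci_alt n m
instance (n : Int) (m : Int) (out : Int) : Decidable (Spec_super_fibonacci n m out) := by unfold Spec_super_fibonacci; infer_instance

-- ===== CLAIM (what is proved, stated in full; the proofs are below) =====
def Claim_equal_super_fibonacci : Prop := ∀ (n : Int) (m : Int), Dom_super_fibonacci n m → Spec_super_fibonacci n m (super_fibonacci n m)

-- ===== LEMMAS AND PROOFS =====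

-- A's step on the sup list, and B's step on (vals, total), named for the proofs
-- (definitionally equal to the ports' loop bodies).
def pvStepA (m : Int) (sup : List Int) (_ : Int) : List Int :=
  ((PySem.List.pyRange 0 m 1).foldl (fun acc j => acc + PySem.List.pyGetD sup j 0) 0) :: sup

def pvStepB (st : List Int × Int) (i : Int) : List Int × Int :=
  (st.1 ++ [st.2], st.2 + (st.2 - PySem.List.pyGetD st.1 i 0))

theorem ones_init (m : Int) :
    (PySem.List.pyRange 0 m 1).map (fun _ => (1:Int)) = List.replicate m.toNat 1 := by
  rw [PySem.List.pyRange_one]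
  simp only [Int.sub_zero, Function.comp_def, List.map_map]
  simp [List.map_const']

theorem take_eq_map_range (xs : List Int) (k : Nat) (h : k ≤ xs.length) :
    (List.range k).map (fun j => xs.getD j 0) = xs.take k := by
  induction k with
  | zero => simp
  | succ k ih =>
    rw [List.range_succ, List.map_append, ih (by omega), List.map_singleton]
    rw [List.getD_eq_getElem xs 0 (by omega)]
    rw [List.take_add_one, List.getElem?_eq_getElem (by omega)]
    simp

-- A's inner loop is the sum of the first m elements.
theorem innerSum_eq (sup : List Int) (m : Int) (_h0 : 0 ≤ m) (h : m.toNat ≤ sup.length) :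
    (PySem.List.pyRange 0 m 1).foldl (fun acc j => acc + PySem.List.pyGetD sup j 0) 0
      = (sup.take m.toNat).sum := by
  rw [PySem.List.foldl_add, PySem.List.pyRange_one]
  simp only [List.map_map, Int.sub_zero]
  rw [show ((fun j => PySem.List.pyGetD sup j 0) ∘ fun k : Nat => (0 : Int) + ↑k)
        = fun j : Nat => sup.getD j 0 by
      funext j; simp [PySem.List.pyGetD_natCast]]
  rw [take_eq_map_range sup m.toNat h]
  simp

-- The main invariant: after folding the same range, A's list is the reverse of B's
-- growing value list, and B's running total is the sum of the current window.
theorem loop_invariant (m : Int) (hm : 0 < m) (k : Nat) :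
    ∀ st : List Int × Int,
      st = (PySem.List.pyRange 0 (k : Int) 1).foldl pvStepB (List.replicate m.toNat 1, m) →
      st.1.length = m.toNat + k ∧
      st.2 = (st.1.drop k).sum ∧
      (PySem.List.pyRange 0 (k : Int) 1).foldl (pvStepA m)
          ((PySem.List.pyRange 0 m 1).map (fun _ => (1:Int))) = st.1.reverse := by
  induction k with
  | zero =>
    intro st hst
    push_cast at hst ⊢
    rw [show PySem.List.pyRange (0:Int) 0 1 = [] from PySem.List.pyRange_one_eq_nil (by omega)] at hst ⊢
    subst hst
    refine ⟨by simp, ?_, ?_⟩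
    · simp only [List.foldl_nil, List.drop_zero, List.sum_replicate, nsmul_eq_mul, mul_one]
      omega
    · simp only [List.foldl_nil, ones_init m]
      simp [List.reverse_replicate]
  | succ k ih =>
    intro st hst
    have hrange : PySem.List.pyRange 0 ((k : Int) + 1) 1
        = PySem.List.pyRange 0 (k : Int) 1 ++ [(k : Int)] :=
      by rw [PySem.List.pyRange_one_append 0 (k:Int) ((k:Int)+1) (by omega) (by omega),
             PySem.List.pyRange_one_singleton]
    set prev := (PySem.List.pyRange 0 (k : Int) 1).foldl pvStepB (List.replicate m.toNat 1, m) with hprev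
    obtain ⟨hlen, htot, hA⟩ := ih prev rfl
    push_cast at hst
    rw [hrange, List.foldl_append] at hst
    simp only [List.foldl_cons, List.foldl_nil] at hst
    rw [← hprev] at hst
    have hklen : k < prev.1.length := by omega
    have hget : PySem.List.pyGetD prev.1 (k : Int) 0 = prev.1[k] := by
      rw [PySem.List.pyGetD_natCast]
      exact List.getD_eq_getElem prev.1 0 hklen
    have hdrop : prev.1.drop k = prev.1[k] :: prev.1.drop (k + 1) :=
      List.drop_eq_getElem_cons hklen
    refine ⟨?_, ?_, ?_⟩
    · rw [hst]
      simp only [pvStepB, List.length_append, List.length_cons, List.length_nil]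
      omega
    · rw [hst]
      simp only [pvStepB]
      rw [List.drop_append_of_le_length (by omega), List.sum_append, hget, htot, hdrop]
      simp only [List.sum_cons, List.sum_nil]
      ring
    · push_cast
      rw [hrange, List.foldl_append, hA]
      simp only [List.foldl_cons, List.foldl_nil]
      rw [hst]
      simp only [pvStepA, pvStepB]
      rw [List.reverse_append]
      congr 1
      rw [htot]
      have hms : m.toNat ≤ prev.1.reverse.length := by simp [hlen]
      rw [innerSum_eq prev.1.reverse m hm.le hms]
      rw [List.take_reverse, List.sum_reverse]
      congr 2
      omega

-- m ≤ 0 and m < n: each of A's iterations pushes a 0.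
theorem zeros_head (m : Int) (hm : m ≤ 0) (l : List Int) (s : List Int) :
    l.foldl (pvStepA m) s = List.replicate l.length 0 ++ s := by
  induction l generalizing s with
  | nil => simp
  | cons x xs ih =>
    rw [List.foldl_cons, ih]
    have : pvStepA m s x = 0 :: s := by
      simp [pvStepA, PySem.List.pyRange_one_eq_nil hm]
    rw [this]
    simp [List.replicate_succ', List.append_assoc]

theorem main_eq (n m : Int) : super_fibonacci n m = super_fibonacci_alt n m := by
  unfold super_fibonacci super_fibonacci_alt
  by_cases hge : m ≥ n
  · simp [hge]
  · simp only [hge, if_false]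
    have hK : 0 < n - m := by omega
    by_cases hm0 : m ≤ 0
    · simp only [hm0, if_true]
      have key : PySem.List.pyGetD
          ((PySem.List.pyRange 0 (n - m) 1).foldl (pvStepA m)
            ((PySem.List.pyRange 0 m 1).map (fun _ => (1:Int)))) 0 0 = 0 := by
        rw [zeros_head m hm0]
        have hlen : (PySem.List.pyRange 0 (n - m) 1).length = (n - m).toNat := by
          simp [ PySem.List.length_pyRange_one ]
        rw [hlen]
        have hne : (n - m).toNat ≠ 0 := by omega
        cases h : (n - m).toNat with
        | zero => exact absurd h hne
        | succ t => simp [List.replicate_succ, PySem.List.pyGetD_zero_cons]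
      exact key
    · simp only [hm0, if_false]
      have hm : 0 < m := by omega
      set K : Nat := (n - m).toNat with hKdef
      have hKcast : ((K : Int)) = n - m := by omega
      obtain ⟨hlen, -, hA⟩ := loop_invariant m hm K _ rfl
      set st := (PySem.List.pyRange 0 (K : Int) 1).foldl pvStepB (List.replicate m.toNat 1, m) with hst
      have hne : st.1 ≠ [] := by
        intro h; rw [h] at hlen; simp at hlen; omega
      have key : PySem.List.pyGetD
          ((PySem.List.pyRange 0 (K : Int) 1).foldl (pvStepA m)
            ((PySem.List.pyRange 0 m 1).map (fun _ => (1:Int)))) 0 0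
          = PySem.List.pyGetD st.1 (-1) 0 := by
        rw [hA, PySem.List.pyGetD_neg_one st.1 0 hne, PySem.List.pyGetD_zero]
        rw [List.getD_eq_getElem st.1.reverse 0
            (by simp [List.length_reverse]; exact List.length_pos_iff.2 hne)]
        rw [List.getElem_reverse, List.getLast_eq_getElem]
        simp
      rw [← hKcast]
      exact key

-- ===== VERDICT (by name: the statement is the Claim_ definition above) =====
theorem super_fibonacci_spec : Claim_equal_super_fibonacci := by
  intro n m _
  unfold Spec_super_fibonacci
  exact main_eq n m
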